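-- pv_equiv track=rewrite | github.com/C1Z4/ourHour | ourHour-chatbot/app/services/context_service.py | _group_members_by_position
-- ===== SOURCE A (Python) =====
-- from typing import Dict, List, Any, Optional
--
-- def _group_members_by_position(members: List[Dict[str, Any]]) -> Dict[str, List[str]]:
--     """직책별 멤버 그룹핑"""
--     position_groups = {}
--     for member in members:
--         position = member['position']
--         if position not in position_groups:
--             position_groups[position] = []
--         position_groups[position].append(member['name'])
--     return position_groups
-- ===== SOURCE B (Python) =====
-- from typing import Dict, List, Any
--
-- def _group_members_by_position(members: List[Dict[str, Any]]) -> Dict[str, List[str]]: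
--     """직책별 멤버 그룹핑 — distinct positions first, then one filter pass per position."""
--     positions = list(dict.fromkeys(m['position'] for m in members))
--     return {p: [m['name'] for m in members if m['position'] == p] for p in positions}
-- ===== Notes on version B (the rewrite author's own statement) =====
-- stated objective: alternative
-- what changed: B replaces A's single-pass dict accumulation with a two-phase plan: collect the distinct positions in first-occurrence order (dict.fromkeys) and then build each group's name list with one filter pass per position.
import Mathlib
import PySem

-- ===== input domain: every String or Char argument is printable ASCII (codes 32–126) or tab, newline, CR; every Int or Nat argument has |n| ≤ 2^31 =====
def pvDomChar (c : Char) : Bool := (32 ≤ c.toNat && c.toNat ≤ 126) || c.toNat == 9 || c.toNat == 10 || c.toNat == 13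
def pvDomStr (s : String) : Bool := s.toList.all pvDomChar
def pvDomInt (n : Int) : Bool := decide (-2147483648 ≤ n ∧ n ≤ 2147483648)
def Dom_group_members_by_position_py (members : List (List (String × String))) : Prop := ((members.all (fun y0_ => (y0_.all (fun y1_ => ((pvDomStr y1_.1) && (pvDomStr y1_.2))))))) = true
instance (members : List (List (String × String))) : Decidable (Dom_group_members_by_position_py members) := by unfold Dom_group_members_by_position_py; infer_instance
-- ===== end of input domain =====

-- B groups by first collecting the distinct positions (ordered dedup) and then doing one
-- filter pass per position, instead of A's single-pass dict accumulation (objective: alternative).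


-- member[k] (first-match lookup; none = Python KeyError, excluded by Pre_)
def pvKey? (member : List (String × String)) (k : String) : Option String :=
  PySem.Dict.get? ⟨member⟩ k

-- ===== PORT A =====
-- one iteration of A's loop; the Option state is none exactly where Python has raised KeyError
def pvAStep (acc : Option (PySem.Dict String (List String))) (member : List (String × String)) :
    Option (PySem.Dict String (List String)) :=
  match acc with
  | none => none
  | some d =>
    match pvKey? member "position", pvKey? member "name" with
    | some pos, some name =>
        let d := if d.contains pos then d else d.insert pos []
        some (d.modify pos [] (fun l => l ++ [name]))
    | _, _ => none

def group_members_by_position_py (members : List (List (String × String))) : List (String × List String) :=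
  match members.foldl pvAStep (some ⟨[]⟩) with
  | some d => d.items
  | none => []   -- unreachable under Pre_ (Python raises KeyError there)

-- ===== PORT B =====
-- list(dict.fromkeys(m['position'] for m in members)): the raw position list, none on KeyError
def pvPositions? : List (List (String × String)) → Option (List String)
  | [] => some []
  | m :: rest =>
    match pvKey? m "position" with
    | none => none
    | some p => (pvPositions? rest).map (p :: ·)

def group_members_by_position_py_alt (members : List (List (String × String))) : List (String × List String) :=
  match pvPositions? members with
  | none => []   -- unreachable under Pre_ (Python raises KeyError there)
  | some raw =>
    (PySem.List.dedup raw).map (fun p =>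
      (p, (members.filter (fun m => pvKey? m "position" == some p)).map
            (fun m => (pvKey? m "name").getD "")))   -- getD: under Pre_ the key is present

-- ===== PRECONDITION & SPEC =====
-- Pre_ excludes exactly the inputs on which Python A raises KeyError: a member without a
-- 'position' or 'name' key.
def Pre_group_members_by_position_py (members : List (List (String × String))) : Prop :=
  (members.all (fun m => (pvKey? m "position").isSome && (pvKey? m "name").isSome)) = true
instance (members : List (List (String × String))) : Decidable (Pre_group_members_by_position_py members) := by unfold Pre_group_members_by_position_py; infer_instance

def pvWitness_group_members_by_position_py : (List (List (String × String))) :=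
  [[("position", "dev"), ("name", "kim")], [("position", "qa"), ("name", "lee")], [("position", "dev"), ("name", "park")]]

def Spec_group_members_by_position_py (members : List (List (String × String))) (out : List (String × List String)) : Prop := out = group_members_by_position_py_alt members
instance (members : List (List (String × String))) (out : List (String × List String)) : Decidable (Spec_group_members_by_position_py members out) := by unfold Spec_group_members_by_position_py; infer_instance

-- ===== CLAIM (what is proved, stated in full; the proofs are below) =====
def Claim_equal_group_members_by_position_py : Prop := ∀ (members : List (List (String × String))), Dom_group_members_by_position_py members → Pre_group_members_by_position_py members → Spec_group_members_by_position_py members (group_members_by_position_py members)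

-- ===== LEMMAS AND PROOFS =====

-- the position / name of a member (meaningful under Pre_)
def pvP (m : List (String × String)) : String := (pvKey? m "position").getD ""
def pvN (m : List (String × String)) : String := (pvKey? m "name").getD ""

-- A's loop body on extracted (position, name) pairs
def pvStep2 (d : PySem.Dict String (List String)) (p n : String) : PySem.Dict String (List String) :=
  (if d.contains p then d else d.insert p []).modify p [] (fun l => l ++ [n])

-- the grouped table of a pair list (B's shape)
def pvGroup (L : List (String × String)) : List (String × List String) :=
  (PySem.List.dedup (L.map Prod.fst)).map
    (fun p => (p, (L.filter (fun pr => pr.1 == p)).map Prod.snd))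

theorem pvA_fold (members : List (List (String × String)))
    (h : ∀ m ∈ members, (pvKey? m "position").isSome ∧ (pvKey? m "name").isSome) :
    ∀ d, members.foldl pvAStep (some d)
      = some (members.foldl (fun d m => pvStep2 d (pvP m) (pvN m)) d) := by
  induction members with
  | nil => intro d; rfl
  | cons m rest ih =>
    intro d
    obtain ⟨hp, hn⟩ := h m (by simp)
    obtain ⟨p, hp⟩ := Option.isSome_iff_exists.mp hp
    obtain ⟨n, hn⟩ := Option.isSome_iff_exists.mp hn
    simp only [List.foldl_cons, pvAStep, hp, hn]
    rw [ih (fun m hm => h m (by simp [hm]))]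
    simp [pvStep2, pvP, pvN, hp, hn]

theorem pvPositions_some (members : List (List (String × String)))
    (h : ∀ m ∈ members, (pvKey? m "position").isSome) :
    pvPositions? members = some (members.map pvP) := by
  induction members with
  | nil => rfl
  | cons m rest ih =>
    obtain ⟨p, hp⟩ := Option.isSome_iff_exists.mp (h m (by simp))
    simp only [pvPositions?, hp, ih (fun m hm => h m (by simp [hm])), Option.map_some, List.map_cons]
    simp [pvP, hp]


theorem dedup_append_singleton {α : Type} [BEq α] [LawfulBEq α] (l : List α) (a : α) :
    PySem.List.dedup (l ++ [a]) = if a ∈ l then PySem.List.dedup l else PySem.List.dedup l ++ [a] := by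
  have h1 : PySem.List.dedup (l ++ [a]) = PySem.Set.add (PySem.List.dedup l) a := by
    simp [PySem.List.dedup, PySem.Set.ofList, List.foldl_append]
  rw [h1, PySem.Set.add]
  by_cases h : a ∈ l
  · simp [PySem.List.dedup, PySem.Set.mem_ofList, h]
  · simp [PySem.List.dedup, PySem.Set.mem_ofList, h]

theorem find?_table (ks : List String) (F : String → List String) (p : String) :
    List.find? (fun pr => pr.1 == p) (ks.map fun q => (q, F q))
      = if p ∈ ks then some (p, F p) else none := by
  induction ks with
  | nil => simp
  | cons q ks ih =>
    by_cases h : q = p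
    · subst h; simp
    · simp only [List.map_cons, List.find?_cons]
      have : (q == p) = false := beq_false_of_ne h
      simp [this, ih, Ne.symm h]

theorem mem_dedup {α : Type} [BEq α] [LawfulBEq α] (l : List α) (a : α) :
    a ∈ PySem.List.dedup l ↔ a ∈ l :=
  PySem.Set.mem_ofList l a

theorem pvCore (L : List (String × String)) :
    (L.foldl (fun d pr => pvStep2 d pr.1 pr.2) (⟨[]⟩ : PySem.Dict String (List String))).items
      = pvGroup L := by
  induction L using List.reverseRecOn with
  | nil => rfl
  | append_singleton L x ih =>
    obtain ⟨p, n⟩ := x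
    rw [List.foldl_append, List.foldl_cons, List.foldl_nil]
    set d := L.foldl (fun d pr => pvStep2 d pr.1 pr.2) (⟨[]⟩ : PySem.Dict String (List String)) with hd
    have hdi : d = ⟨pvGroup L⟩ := by rw [← ih]
    rw [hdi]
    have hks : ∀ q, q ∈ PySem.List.dedup (L.map Prod.fst) ↔ q ∈ L.map Prod.fst :=
      fun q => mem_dedup (L.map Prod.fst) q
    have hcont : (⟨pvGroup L⟩ : PySem.Dict String (List String)).contains p
        = (PySem.List.dedup (L.map Prod.fst)).any (· == p) := by
      simp [PySem.Dict.contains, pvGroup, List.any_map, Function.comp_def]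
    have hmapfst : (L ++ [(p, n)]).map Prod.fst = L.map Prod.fst ++ [p] := by
      simp
    by_cases hp : p ∈ L.map Prod.fst
    · -- existing key
      have hpk : p ∈ PySem.List.dedup (L.map Prod.fst) := (hks p).mpr hp
      have hany : (PySem.List.dedup (L.map Prod.fst)).any (· == p) = true :=
        List.any_eq_true.mpr ⟨p, hpk, beq_self_eq_true p⟩
      have hfind : List.find? (fun pr => pr.1 == p) (pvGroup L)
          = some (p, (L.filter (fun pr => pr.1 == p)).map Prod.snd) := by
        rw [pvGroup, find?_table (F := fun q => (L.filter (fun pr => pr.1 == q)).map Prod.snd),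
          if_pos hpk]
      have hR : pvGroup (L ++ [(p, n)])
          = (PySem.List.dedup (L.map Prod.fst)).map
              (fun q => (q, ((L ++ [(p, n)]).filter (fun pr => pr.1 == q)).map Prod.snd)) := by
        rw [pvGroup, hmapfst, dedup_append_singleton, if_pos hp]
      rw [pvStep2, hcont, hany, if_pos rfl, PySem.Dict.modify, PySem.Dict.getD,
        PySem.Dict.get?, hfind, PySem.Dict.insert]
      have hc2 : (⟨pvGroup L⟩ : PySem.Dict String (List String)).contains p = true := by
        rw [hcont]; exact hany
      rw [if_pos hc2, hR]
      show (pvGroup L).map _ = _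
      rw [pvGroup, List.map_map]
      apply List.map_congr_left
      intro q hq
      by_cases hqp : q = p
      · subst hqp
        simp [List.filter_append]
      · have h1 : (q == p) = false := beq_false_of_ne hqp
        have h2 : (p == q) = false := beq_false_of_ne (Ne.symm hqp)
        simp [List.filter_append, h2, hqp]
    · -- new key
      have hpk : p ∉ PySem.List.dedup (L.map Prod.fst) := fun hc => hp ((hks p).mp hc)
      have hany : (PySem.List.dedup (L.map Prod.fst)).any (· == p) = false := by
        rw [List.any_eq_false]
        intro q hq
        have hqp : q ≠ p := fun h => hpk (h ▸ hq)
        simp [hqp]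
      have hfilnil : L.filter (fun pr => pr.1 == p) = [] := by
        rw [List.filter_eq_nil_iff]
        intro pr hpr h
        exact hp (List.mem_map.mpr ⟨pr, hpr, beq_iff_eq.mp h⟩)
      have hfind0 : List.find? (fun pr => pr.1 == p) (pvGroup L) = none := by
        rw [pvGroup, find?_table (F := fun q => (L.filter (fun pr => pr.1 == q)).map Prod.snd),
          if_neg hpk]
      have hR : pvGroup (L ++ [(p, n)])
          = (PySem.List.dedup (L.map Prod.fst)).map
              (fun q => (q, ((L ++ [(p, n)]).filter (fun pr => pr.1 == q)).map Prod.snd))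
            ++ [(p, ((L ++ [(p, n)]).filter (fun pr => pr.1 == p)).map Prod.snd)] := by
        rw [pvGroup, hmapfst, dedup_append_singleton, if_neg hp, List.map_append, List.map_cons,
          List.map_nil]
      rw [pvStep2, hcont, hany]
      simp only [Bool.false_eq_true, if_false]
      rw [PySem.Dict.insert]
      have hc0 : (⟨pvGroup L⟩ : PySem.Dict String (List String)).contains p = false := by
        rw [hcont]; exact hany
      rw [hc0]
      simp only [Bool.false_eq_true, if_false]
      rw [PySem.Dict.modify, PySem.Dict.getD, PySem.Dict.get?]
      show (PySem.Dict.insert ⟨pvGroup L ++ [(p, [])]⟩ p _).items = pvGroup (L ++ [(p, n)])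
      have hc1 : (⟨pvGroup L ++ [(p, [])]⟩ : PySem.Dict String (List String)).contains p = true := by
        simp [PySem.Dict.contains]
      have hfind1 : List.find? (fun pr => pr.1 == p) (pvGroup L ++ [(p, [])]) = some (p, []) := by
        rw [List.find?_append, hfind0]; simp
      rw [PySem.Dict.insert, if_pos hc1, hfind1, hR]
      show (pvGroup L ++ [(p, [])]).map _ = _
      rw [List.map_append]
      congr 1
      · rw [pvGroup, List.map_map]
        apply List.map_congr_left
        intro q hq
        have hqp : q ≠ p := fun h => hpk (by rw [← h]; exact hq)
        have h1 : (q == p) = false := beq_false_of_ne hqp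
        have h2 : (p == q) = false := beq_false_of_ne (Ne.symm hqp)
        simp [List.filter_append, h2, hqp]
      · simp [List.filter_append, hfilnil]


-- ===== VERDICT (by name: the statement is the Claim_ definition above) =====
theorem group_members_by_position_py_spec : Claim_equal_group_members_by_position_py := by
  intro members _hdom hpre
  unfold Spec_group_members_by_position_py
  unfold Pre_group_members_by_position_py at hpre
  have h : ∀ m ∈ members, (pvKey? m "position").isSome ∧ (pvKey? m "name").isSome := by
    intro m hm
    have := List.all_eq_true.mp hpre m hm
    simpa [Bool.and_eq_true] using this
  unfold group_members_by_position_py group_members_by_position_py_alt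
  rw [pvA_fold members h, pvPositions_some members (fun m hm => (h m hm).1)]
  show (members.foldl (fun d m => pvStep2 d (pvP m) (pvN m)) ⟨[]⟩).items = _
  have hA : members.foldl (fun d m => pvStep2 d (pvP m) (pvN m)) (⟨[]⟩ : PySem.Dict String (List String))
      = (members.map (fun m => (pvP m, pvN m))).foldl (fun d pr => pvStep2 d pr.1 pr.2) ⟨[]⟩ := by
    rw [List.foldl_map]
  rw [hA, pvCore, pvGroup]
  have hfst : (members.map (fun m => (pvP m, pvN m))).map Prod.fst = members.map pvP := by
    simp [Function.comp_def]
  rw [hfst]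
  apply List.map_congr_left
  intro p _hp
  have hfil : members.filter (fun m => pvKey? m "position" == some p)
      = members.filter (fun m => pvP m == p) := by
    apply List.filter_congr
    intro m hm
    obtain ⟨a, ha⟩ := Option.isSome_iff_exists.mp (h m hm).1
    simp [pvP, ha]
  rw [hfil, List.filter_map, List.map_map]
  rfl
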